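-- pv_equiv track=rewrite | github.com/KeremZaman/explaiNLI | eval/human_agreement.py | _create_gold_labels
-- ===== SOURCE A (Python) =====
-- from string import punctuation
-- from functools import reduce
-- from typing import List, Dict, Union, Tuple
--
-- def _create_gold_labels(highlighted_sentence: str) -> List[int]:
--     """
--     Create a list of gold labels from the given highlighted sentence
--
--     :param highlighted_sentence:
--     :return:
--     """
--     gold_labels = []
--
--     for i, word in enumerate(highlighted_sentence.split()):
--
--         # highlighted words are marked as *word*
--         marked = True if (word.startswith('*') and word.endswith('*')) else False
--         word = word.strip('*')
--
--         # add space for each punctuation, split word to count punctuations as new tokens and make their label the same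
--         # with the main word
--         word = reduce(lambda w, p: w.replace(p, f' {p} '), punctuation, word)
--         for token in word.split():
--             gold_labels.append(1 if marked else 0)
--
--     return gold_labels
-- ===== SOURCE B (Python) =====
-- from string import punctuation
--
-- _PUNCT = set(punctuation)
--
-- def _create_gold_labels(highlighted_sentence: str):
--     """One left-to-right character scan per word: each punctuation char is its own
--     token; each maximal run of non-punctuation chars is one token."""
--     labels = []
--     for word in highlighted_sentence.split():
--         marked = word.startswith('*') and word.endswith('*')
--         lab = 1 if marked else 0
--         in_run = False
--         for ch in word.strip('*'):
--             if ch in _PUNCT: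
--                 labels.append(lab)
--                 in_run = False
--             else:
--                 if not in_run:
--                     labels.append(lab)
--                 in_run = True
--     return labels
-- ===== Notes on version B (the rewrite author's own statement) =====
-- stated objective: simpler
-- what changed: A rebuilds each word with 32 successive whole-string replace passes (one per punctuation character) and then splits it again; B makes a single left-to-right character scan per word, appending one label per punctuation character and one per maximal run of non-punctuation characters.
import Mathlib
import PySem

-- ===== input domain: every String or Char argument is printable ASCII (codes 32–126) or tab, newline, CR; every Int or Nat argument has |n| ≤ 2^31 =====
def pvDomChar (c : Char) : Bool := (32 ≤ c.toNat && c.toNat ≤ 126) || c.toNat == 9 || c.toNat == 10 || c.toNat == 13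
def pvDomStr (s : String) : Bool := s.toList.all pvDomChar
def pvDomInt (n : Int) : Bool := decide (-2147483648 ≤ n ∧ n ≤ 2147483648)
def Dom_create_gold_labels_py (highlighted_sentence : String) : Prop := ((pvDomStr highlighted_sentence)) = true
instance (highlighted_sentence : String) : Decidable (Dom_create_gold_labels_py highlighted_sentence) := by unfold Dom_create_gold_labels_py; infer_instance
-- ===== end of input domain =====

-- B replaces A's 32 whole-string replace passes per word by one left-to-right character
-- scan per word that counts punctuation chars and maximal non-punctuation runs (objective: simpler).

-- string.punctuation
def pyPunctuation : String := "!\"#$%&'()*+,-./:;<=>?@[\\]^_`{|}~"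

-- ===== PORT A =====
def create_gold_labels_py (highlighted_sentence : String) : List Int :=
  (PySem.List.enumerate (PySem.Str.split₀ highlighted_sentence)).foldl
    (fun gold_labels iw =>
      let word := iw.2
      let marked := PySem.Str.startswith word "*" && PySem.Str.endswith word "*"
      let word1 := PySem.Str.stripChars word "*"
      -- reduce(lambda w, p: w.replace(p, f' {p} '), punctuation, word)
      let word2 := pyPunctuation.toList.foldl
        (fun w p => PySem.Str.replace w (String.ofList [p]) (String.ofList [' ', p, ' '])) word1
      (PySem.Str.split₀ word2).foldl
        (fun g _token => g ++ [if marked then (1 : Int) else 0]) gold_labels) []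

-- ===== PORT B =====
def cglScanStep (lab : Int) (st : List Int × Bool) (ch : Char) : List Int × Bool :=
  if pyPunctuation.toList.contains ch then (st.1 ++ [lab], false)
  else (if st.2 then st.1 else st.1 ++ [lab], true)

def create_gold_labels_py_alt (highlighted_sentence : String) : List Int :=
  (PySem.Str.split₀ highlighted_sentence).foldl
    (fun labels word =>
      let marked := PySem.Str.startswith word "*" && PySem.Str.endswith word "*"
      let lab : Int := if marked then 1 else 0
      ((PySem.Str.stripChars word "*").toList.foldl (cglScanStep lab) (labels, false)).1) []

-- ===== PRECONDITION & SPEC =====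
def Spec_create_gold_labels_py (highlighted_sentence : String) (out : List Int) : Prop := out = create_gold_labels_py_alt highlighted_sentence
instance (highlighted_sentence : String) (out : List Int) : Decidable (Spec_create_gold_labels_py highlighted_sentence out) := by unfold Spec_create_gold_labels_py; infer_instance

-- ===== CLAIM (what is proved, stated in full; the proofs are below) =====
def Claim_equal_create_gold_labels_py : Prop := ∀ (highlighted_sentence : String), Dom_create_gold_labels_py highlighted_sentence → Spec_create_gold_labels_py highlighted_sentence (create_gold_labels_py highlighted_sentence)

-- ===== LEMMAS AND PROOFS =====

-- expansion of one char under the replace passes for the chars of ps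
def cglExpand (ps : List Char) (c : Char) : List Char :=
  if ps.contains c then [' ', c, ' '] else [c]

-- token count of split₀ on the expanded word, with a pending partial token iff inRun
def cglN (cs : List Char) (inRun : Bool) : Nat :=
  match cs, inRun with
  | [], true => 1
  | [], false => 0
  | c :: cs, inRun =>
    if pyPunctuation.toList.contains c then (if inRun then 1 else 0) + 1 + cglN cs false
    else cglN cs true

-- token count of B's scan
def cglM (cs : List Char) (inRun : Bool) : Nat :=
  match cs with
  | [] => 0
  | c :: cs =>
    if pyPunctuation.toList.contains c then 1 + cglM cs false
    else (if inRun then 0 else 1) + cglM cs true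

lemma cglN_eq_cglM (cs : List Char) (r : Bool) :
    cglN cs r = cglM cs r + (if r then 1 else 0) := by
  induction cs generalizing r with
  | nil => cases r <;> simp [cglN, cglM]
  | cons c cs ih =>
    simp only [cglN, cglM]
    by_cases hc : c ∈ pyPunctuation.toList <;>
      cases r <;> simp [hc, ih] <;> omega

lemma cgl_scan_eq (lab : Int) (cs : List Char) :
    ∀ (out : List Int) (r : Bool),
      (cs.foldl (cglScanStep lab) (out, r)).1 = out ++ List.replicate (cglM cs r) lab := by
  induction cs with
  | nil => intro out r; simp [cglM]
  | cons c cs ih =>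
    intro out r
    simp only [List.foldl_cons, cglScanStep, cglM]
    by_cases hc : c ∈ pyPunctuation.toList
    · simp [hc, ih, Nat.one_add, List.replicate_succ]
    · cases r <;> simp [hc, ih, Nat.one_add, List.replicate_succ]

lemma cgl_replace_go (p : Char) (rep : List Char) :
    ∀ (fuel : Nat) (l acc : List Char), l.length ≤ fuel →
      PySem.Chars.replace.go [p] rep fuel l acc
        = acc.reverse ++ l.flatMap (fun c => if c = p then rep else [c])
  | 0, [], acc, _ => by simp [PySem.Chars.replace.go]
  | 0, c :: t, acc, h => by simp at h
  | fuel+1, [], acc, _ => by simp [PySem.Chars.replace.go]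
  | fuel+1, c :: t, acc, h => by
      have ht : t.length ≤ fuel := by simpa using h
      simp only [PySem.Chars.replace.go]
      by_cases hc : p = c
      · subst hc
        simp [List.isPrefixOf, cgl_replace_go p rep fuel t _ ht]
      · have hc' : ¬ c = p := fun e => hc e.symm
        simp [List.isPrefixOf, hc, hc', cgl_replace_go p rep fuel t _ ht]

lemma cgl_replace_single (p : Char) (rep s : List Char) :
    PySem.Chars.replace s [p] rep = s.flatMap (fun c => if c = p then rep else [c]) := by
  simp [PySem.Chars.replace, cgl_replace_go p rep s.length s [] le_rfl]

lemma cgl_fold_replace (ps : List Char) :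
    ∀ (done : List Char) (cs : List Char), (done ++ ps).Nodup → ' ' ∉ ps →
      ps.foldl (fun w p => PySem.Chars.replace w [p] [' ', p, ' '])
          (cs.flatMap (cglExpand done))
        = cs.flatMap (cglExpand (done ++ ps)) := by
  induction ps with
  | nil => intro done cs _ _; simp
  | cons p ps ih =>
    intro done cs hnd hsp
    have hpd : p ∉ done := fun hmem =>
      (List.nodup_append.mp hnd).2.2 p hmem p (by simp) rfl
    have hpp : p ∉ ps := (List.nodup_cons.mp (List.nodup_append.mp hnd).2.1).1
    have hps : p ≠ ' ' := fun e => hsp (List.mem_cons.mpr (Or.inl e.symm))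
    simp only [List.foldl_cons]
    rw [cgl_replace_single, List.flatMap_assoc]
    have hstep : ∀ c : Char,
        (cglExpand done c).flatMap (fun c => if c = p then [' ', p, ' '] else [c])
          = cglExpand (done ++ [p]) c := by
      intro c
      have hps' : ¬ (' ' = p) := fun e => hps e.symm
      by_cases hc : c ∈ done
      · have hcp : ¬ c = p := by intro e; subst e; exact hpd hc
        simp [cglExpand, hc, hcp, hps']
      · by_cases hcp : c = p
        · subst hcp; simp [cglExpand, hc]
        · simp [cglExpand, hc, hcp]
    have : cs.flatMap (fun c => (cglExpand done c).flatMap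
              (fun c => if c = p then [' ', p, ' '] else [c]))
        = cs.flatMap (cglExpand (done ++ [p])) := by
      apply List.flatMap_congr; intro c _; exact hstep c
    rw [this]
    have hnd' : ((done ++ [p]) ++ ps).Nodup := by simpa [List.append_assoc] using hnd
    have := ih (done ++ [p]) cs hnd' (fun h => hsp (by simp [h]))
    simpa [List.append_assoc] using this

lemma cgl_punct_toList : pyPunctuation.toList = ['!', '"', '#', '$', '%', '&', '\'', '(', ')', '*', '+', ',', '-', '.', '/', ':', ';', '<', '=', '>', '?', '@', '[', '\\', ']', '^', '_', '`', '{', '|', '}', '~'] := rfl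

lemma cgl_punct_not_space : ∀ c ∈ pyPunctuation.toList, PySem.Chars.isspace c = false := by
  intro c hc
  rw [cgl_punct_toList] at hc
  fin_cases hc <;> rfl

lemma cgl_punct_nodup : pyPunctuation.toList.Nodup := by
  rw [cgl_punct_toList]; decide

lemma cgl_space_not_punct : ' ' ∉ pyPunctuation.toList := by
  rw [cgl_punct_toList]; decide

lemma cgl_go_nil (cur : List Char) (acc : List (List Char)) :
    PySem.Chars.split₀.go [] cur acc
      = if cur.isEmpty then acc.reverse else (cur.reverse :: acc).reverse := rfl

lemma cgl_go_cons (c : Char) (rest cur : List Char) (acc : List (List Char)) :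
    PySem.Chars.split₀.go (c :: rest) cur acc =
      if PySem.Chars.isspace c then
        (if cur.isEmpty then PySem.Chars.split₀.go rest [] acc
         else PySem.Chars.split₀.go rest [] (cur.reverse :: acc))
      else PySem.Chars.split₀.go rest (c :: cur) acc := rfl

lemma cgl_split_go_count (cs : List Char) :
    ∀ (acc : List (List Char)) (cur : List Char),
      (∀ c ∈ cs, PySem.Chars.isspace c = false) →
      (PySem.Chars.split₀.go ((cs.flatMap (cglExpand pyPunctuation.toList))) cur acc).length
        = acc.length + cglN cs (!cur.isEmpty) := by
  induction cs with
  | nil =>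
    intro acc cur _
    cases cur <;> simp [cgl_go_nil, cglN]
  | cons c cs ih =>
    intro acc cur hws
    have hcs : ∀ x ∈ cs, PySem.Chars.isspace x = false := fun x hx => hws x (by simp [hx])
    have IH := fun acc cur => ih acc cur hcs
    by_cases hc : c ∈ pyPunctuation.toList
    · have hcws : PySem.Chars.isspace c = false := cgl_punct_not_space c hc
      have hsp : PySem.Chars.isspace ' ' = true := by decide
      cases cur with
      | nil =>
        simp [cglExpand, hc, cgl_go_cons, hsp, hcws, IH, cglN]
        omega
      | cons x xs =>
        simp [cglExpand, hc, cgl_go_cons, hsp, hcws, IH, cglN]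
        omega
    · have hcws : PySem.Chars.isspace c = false := hws c (by simp)
      simp [cglExpand, hc, cgl_go_cons, hcws, IH, cglN]

lemma cgl_split_words_no_space :
    ∀ (s cur : List Char) (acc : List (List Char)),
      (∀ c ∈ cur, PySem.Chars.isspace c = false) →
      (∀ w ∈ acc, ∀ c ∈ w, PySem.Chars.isspace c = false) →
      ∀ w ∈ PySem.Chars.split₀.go s cur acc, ∀ c ∈ w, PySem.Chars.isspace c = false := by
  intro s
  induction s with
  | nil =>
    intro cur acc hcur hacc w hw
    rw [cgl_go_nil] at hw
    by_cases h : cur.isEmpty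
    · rw [if_pos h, List.mem_reverse] at hw
      exact hacc w hw
    · rw [if_neg h, List.mem_reverse, List.mem_cons] at hw
      rcases hw with hw | hw
      · subst hw; intro c hc; exact hcur c (by simpa using hc)
      · exact hacc w hw
  | cons ch s ih =>
    intro cur acc hcur hacc w hw
    rw [cgl_go_cons] at hw
    by_cases hws : PySem.Chars.isspace ch = true
    · rw [if_pos hws] at hw
      by_cases hcure : cur.isEmpty
      · rw [if_pos hcure] at hw
        exact ih [] acc (by simp) hacc w hw
      · rw [if_neg hcure] at hw
        refine ih [] (cur.reverse :: acc) (by simp) ?_ w hw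
        intro v hv
        rcases List.mem_cons.mp hv with hv | hv
        · subst hv; intro c hc; exact hcur c (by simpa using hc)
        · exact hacc v hv
    · rw [if_neg hws] at hw
      refine ih (ch :: cur) acc ?_ hacc w hw
      intro c hc
      rcases List.mem_cons.mp hc with hc | hc
      · subst hc; simpa using hws
      · exact hcur c hc

lemma cgl_mem_stripChars {s chars : List Char} {c : Char}
    (h : c ∈ PySem.Chars.stripChars s chars) : c ∈ s := by
  simp only [PySem.Chars.stripChars] at h
  rw [List.mem_reverse] at h
  have h1 := (List.dropWhile_sublist _).subset h
  rw [List.mem_reverse] at h1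
  exact (List.dropWhile_sublist _).subset h1

lemma cgl_fold_append_const (lab : Int) (l : List String) (g : List Int) :
    l.foldl (fun g _ => g ++ [lab]) g = g ++ List.replicate l.length lab := by
  induction l generalizing g with
  | nil => simp
  | cons x l ih => simp [ih, List.replicate_succ]

lemma cgl_enum_cons {α : Type} (x : α) (l : List α) (s : Int) :
    PySem.List.enumerate (x :: l) s = (s, x) :: PySem.List.enumerate l (s + 1) := rfl

lemma cgl_enumerate_foldl {α β : Type} (G : β → (Int × α) → β)
    (hG : ∀ (a : β) (i j : Int) (x : α), G a (i, x) = G a (j, x)) :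
    ∀ (l : List α) (start : Int) (init : β),
      (PySem.List.enumerate l start).foldl G init
        = l.foldl (fun a x => G a (0, x)) init := by
  intro l
  induction l with
  | nil => intro start init; rfl
  | cons x l ih =>
    intro start init
    rw [cgl_enum_cons, List.foldl_cons, List.foldl_cons, hG init start 0, ih]

lemma cgl_str_fold_replace_toList (ps : List Char) (w : String) :
    (ps.foldl (fun w p => PySem.Str.replace w (String.ofList [p]) (String.ofList [' ', p, ' '])) w).toList
      = ps.foldl (fun w p => PySem.Chars.replace w [p] [' ', p, ' ']) w.toList := by
  induction ps generalizing w with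
  | nil => simp
  | cons p ps ih =>
    rw [List.foldl_cons, List.foldl_cons, ih]
    simp [PySem.Str.toList_replace]

lemma cgl_len_split (s : String) :
    (PySem.Str.split₀ s).length = (PySem.Chars.split₀ s.toList).length := by
  rw [← PySem.Str.split₀_map_toList, List.length_map]

lemma cgl_flatMap_expand_nil (cs : List Char) : List.flatMap (cglExpand []) cs = cs := by
  induction cs with
  | nil => rfl
  | cons c cs ih => simp [cglExpand, ih]

lemma cgl_count_eq (cs : List Char) (hws : ∀ c ∈ cs, PySem.Chars.isspace c = false) :
    (PySem.Chars.split₀ (pyPunctuation.toList.foldl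
        (fun v p => PySem.Chars.replace v [p] [' ', p, ' ']) cs)).length
      = cglM cs false := by
  have hbase := cgl_flatMap_expand_nil cs
  have h2 := cgl_fold_replace pyPunctuation.toList [] cs
      (by simpa using cgl_punct_nodup) cgl_space_not_punct
  rw [hbase, List.nil_append] at h2
  rw [h2]
  have h3 := cgl_split_go_count cs [] [] hws
  simp only [PySem.Chars.split₀]
  rw [h3]
  simp [cglN_eq_cglM]

-- per-word agreement: A's inner token loop appends the same labels B's scan appends
lemma cgl_word_eq (w : String) (g : List Int) (lab : Int)
    (hw : ∀ c ∈ w.toList, PySem.Chars.isspace c = false) :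
    (PySem.Str.split₀ (pyPunctuation.toList.foldl
        (fun v p => PySem.Str.replace v (String.ofList [p]) (String.ofList [' ', p, ' ']))
        (PySem.Str.stripChars w "*"))).foldl
      (fun gl _token => gl ++ [lab]) g
    = ((PySem.Str.stripChars w "*").toList.foldl (cglScanStep lab) (g, false)).1 := by
  have hw0ws : ∀ c ∈ (PySem.Str.stripChars w "*").toList, PySem.Chars.isspace c = false := by
    intro c hc
    rw [PySem.Str.toList_stripChars] at hc
    exact hw c (cgl_mem_stripChars hc)
  rw [cgl_fold_append_const, cgl_scan_eq]
  have hn := cgl_count_eq (PySem.Str.stripChars w "*").toList hw0ws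
  rw [cgl_len_split, cgl_str_fold_replace_toList, hn]

-- ===== VERDICT (by name: the statement is the Claim_ definition above) =====
theorem create_gold_labels_py_spec : Claim_equal_create_gold_labels_py := by
  intro hs _
  unfold Spec_create_gold_labels_py create_gold_labels_py create_gold_labels_py_alt
  rw [cgl_enumerate_foldl _ (fun a i j x => rfl)]
  apply PySem.List.foldl_congr_mem
  intro g w hwmem
  dsimp only
  have hwws : ∀ c ∈ w.toList, PySem.Chars.isspace c = false := by
    intro c hc
    have hmem : w.toList ∈ PySem.Chars.split₀ hs.toList := by
      rw [← PySem.Str.split₀_map_toList]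
      exact List.mem_map_of_mem hwmem
    have := cgl_split_words_no_space hs.toList [] [] (by simp) (by simp)
    exact this w.toList (by simpa [PySem.Chars.split₀] using hmem) c hc
  exact cgl_word_eq w g (if (PySem.Str.startswith w "*" && PySem.Str.endswith w "*") then (1 : Int) else 0) hwws
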